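-- pv_equiv track=rewrite | github.com/Prasisangdembe/Englis-to-Nepali-translator | utils/limbu_utils.py | validate_word_structure
-- ===== SOURCE A (Python) =====
-- def validate_word_structure(word: str) -> bool:
--     """Validate Limbu word structure"""
--     # Basic validation rules
--     # Limbu words typically don't have more than 3 consonants in a row
--     consonant_count = 0
--
--     for char in word.lower():
--         if char in 'bcdfghjklmnpqrstvwxyz':
--             consonant_count += 1
--             if consonant_count > 3:
--                 return False
--         else:
--             consonant_count = 0
--
--     return True
-- ===== SOURCE B (Python) =====
-- import re
--
-- _RUN4 = re.compile(r'[bcdfghjklmnpqrstvwxyz]{4}')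
--
-- def validate_word_structure(word: str) -> bool:
--     """Validate Limbu word structure"""
--     return _RUN4.search(word.lower()) is None
-- ===== Notes on version B (the rewrite author's own statement) =====
-- stated objective: idiomatic
-- what changed: Replaces the explicit consonant-run counter with reset-on-vowel by a single precompiled regex search for four consecutive consonants in the lowercased word.
import Mathlib
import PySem

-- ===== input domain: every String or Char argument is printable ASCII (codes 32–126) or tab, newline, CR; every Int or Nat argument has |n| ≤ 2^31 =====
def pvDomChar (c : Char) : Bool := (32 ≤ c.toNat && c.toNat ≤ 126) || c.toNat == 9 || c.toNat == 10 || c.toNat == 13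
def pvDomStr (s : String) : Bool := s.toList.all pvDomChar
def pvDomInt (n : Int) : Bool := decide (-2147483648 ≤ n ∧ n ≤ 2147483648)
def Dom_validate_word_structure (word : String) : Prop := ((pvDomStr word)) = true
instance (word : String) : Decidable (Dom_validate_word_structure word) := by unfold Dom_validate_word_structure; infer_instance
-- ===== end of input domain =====

-- B replaces A's explicit consonant-run counter by a regex-style search for four
-- consecutive consonants in the lowercased word (idiomatic; same cost).

-- ===== PORT A =====
-- char in 'bcdfghjklmnpqrstvwxyz'
def pvConsA (c : Char) : Bool := "bcdfghjklmnpqrstvwxyz".toList.contains c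

-- the for-loop with early return: consonant_count threaded as an Int accumulator
def pvLoopA : List Char → Int → Bool
  | [], _ => true
  | c :: cs, cnt =>
      if pvConsA c then
        (if cnt + 1 > 3 then false else pvLoopA cs (cnt + 1))
      else
        pvLoopA cs 0

def validate_word_structure (word : String) : Bool :=
  pvLoopA (PySem.Str.lower word).toList 0

-- ===== PORT B =====
def pvConsB (c : Char) : Bool := "bcdfghjklmnpqrstvwxyz".toList.contains c

-- re.search(r'[bcdfghjklmnpqrstvwxyz]{4}', s): does any window of 4 consecutive
-- chars consist of consonants?  (Hand-ported; exact for this fixed pattern.)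
def pvSearchRun4 : List Char → Bool
  | a :: rest@(b :: c :: d :: _) =>
      (pvConsB a && pvConsB b && pvConsB c && pvConsB d) || pvSearchRun4 rest
  | _ => false

def validate_word_structure_alt (word : String) : Bool :=
  !pvSearchRun4 (PySem.Str.lower word).toList

-- ===== PRECONDITION & SPEC =====
def Spec_validate_word_structure (word : String) (out : Bool) : Prop := out = validate_word_structure_alt word
instance (word : String) (out : Bool) : Decidable (Spec_validate_word_structure word out) := by unfold Spec_validate_word_structure; infer_instance

-- ===== CLAIM (what is proved, stated in full; the proofs are below) =====
def Claim_equal_validate_word_structure : Prop := ∀ (word : String), Dom_validate_word_structure word → Spec_validate_word_structure word (validate_word_structure word)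

-- ===== LEMMAS AND PROOFS =====

-- pref n l: the first n chars of l exist and are all consonants
def pref : Nat → List Char → Bool
  | 0, _ => true
  | _ + 1, [] => false
  | n + 1, c :: cs => pvConsB c && pref n cs

theorem pref_succ_imp (n : Nat) (l : List Char) (h : pref (n + 1) l = true) : pref n l = true := by
  induction n generalizing l with
  | zero => simp [pref]
  | succ m ih =>
      cases l with
      | nil => simp [pref] at h
      | cons c cs =>
          simp [pref] at h ⊢
          exact ⟨h.1, ih cs h.2⟩

theorem searchRun4_cons (a : Char) (cs : List Char) :
    pvSearchRun4 (a :: cs) = ((pvConsB a && pref 3 cs) || pvSearchRun4 cs) := by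
  match cs with
  | [] => simp [pvSearchRun4, pref]
  | [b] => simp [pvSearchRun4, pref]
  | [b, c] => simp [pvSearchRun4, pref]
  | b :: c :: d :: rest =>
      simp [pvSearchRun4, pref, Bool.and_assoc]

theorem pvKey (l : List Char) :
    (pvLoopA l 0 = !pvSearchRun4 l) ∧
    (pvLoopA l 1 = !(pref 3 l || pvSearchRun4 l)) ∧
    (pvLoopA l 2 = !(pref 2 l || pvSearchRun4 l)) ∧
    (pvLoopA l 3 = !(pref 1 l || pvSearchRun4 l)) := by
  induction l with
  | nil => simp [pvLoopA, pvSearchRun4, pref]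
  | cons c cs ih =>
      obtain ⟨ih0, ih1, ih2, ih3⟩ := ih
      have hAB : pvConsA c = pvConsB c := rfl
      by_cases hc : pvConsB c = true
      · refine ⟨?_, ?_, ?_, ?_⟩ <;>
          simp [pvLoopA, hAB, hc, searchRun4_cons, pref, ih1, ih2, ih3] <;>
          try rfl
        · -- goal for cnt = 1: absorb pref 3 cs into pref 2 cs
          cases h3 : pref 3 cs with
          | false => simp
          | true => simp [pref_succ_imp 2 cs h3]
        · -- goal for cnt = 2: absorb pref 3 cs into pref 1 cs
          cases h3 : pref 3 cs with
          | false => simp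
          | true => simp [pref_succ_imp 1 cs (pref_succ_imp 2 cs h3)]
      · have hc' : pvConsB c = false := by simpa using hc
        refine ⟨?_, ?_, ?_, ?_⟩ <;>
          simp [pvLoopA, hAB, hc', searchRun4_cons, pref, ih0]

-- ===== VERDICT (by name: the statement is the Claim_ definition above) =====
theorem validate_word_structure_spec : Claim_equal_validate_word_structure := by
  intro word _
  unfold Spec_validate_word_structure validate_word_structure validate_word_structure_alt
  exact (pvKey _).1
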